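-- pv_equiv track=rewrite | github.com/craig04/lintCode_Python | lintCode/lt_721_next_sparse_number.py | __isSparse
-- ===== SOURCE A (Python) =====
-- def __isSparse(x):
--     if x == 0:
--         return True
--     low = 0
--     while x:
--         bit = x & -x
--         if bit == low << 1:
--             return False
--         x &= ~bit
--         low = bit
--     return True
-- ===== SOURCE B (Python) =====
-- def __isSparse(x):
--     return (x & (x >> 1)) == 0
-- ===== Notes on version B (the rewrite author's own statement) =====
-- stated objective: idiomatic
-- what changed: Replaced the lowest-set-bit isolation loop with a single closed-form bitwise test: AND x with its right shift by one and compare against zero; this detects adjacent set bits in one expression and is exact for negatives under Python's infinite two's-complement.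
import Mathlib
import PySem

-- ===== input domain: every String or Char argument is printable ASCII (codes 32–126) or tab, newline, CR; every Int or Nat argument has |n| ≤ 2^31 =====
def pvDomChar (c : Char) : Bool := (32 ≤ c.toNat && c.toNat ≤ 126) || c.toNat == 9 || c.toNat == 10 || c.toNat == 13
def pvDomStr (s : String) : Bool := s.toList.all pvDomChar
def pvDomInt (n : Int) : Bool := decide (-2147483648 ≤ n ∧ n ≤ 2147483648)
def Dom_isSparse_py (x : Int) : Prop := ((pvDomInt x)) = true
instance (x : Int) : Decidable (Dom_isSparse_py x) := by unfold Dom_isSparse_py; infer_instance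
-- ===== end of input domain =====

-- B replaces A's lowest-set-bit isolation loop by a single closed-form bitwise test (AND of x with its right shift by one, compared against zero); exact for negatives under Python's two's complement. A is total; the equivalence below is proved for every Int.

-- ===== PORT A =====
-- the while-loop of A; the Nat fuel only makes the recursion structural — the proof shows 2*bitCount x + 2 iterations always suffice
def isSparseLoop : Nat → Int → Int → Bool
  | 0, _, _ => true
  | (fuel+1), x, low =>
    if x = 0 then true
    else
      let bit := PySem.Int.band x (-x)
      if bit = low <<< (1:Nat) then false
      else isSparseLoop fuel (PySem.Int.band x (Int.not bit)) bit

def isSparse_py (x : Int) : Bool :=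
  if x == 0 then true
  else isSparseLoop (2 * PySem.Int.bitCount x + 2) x 0

-- ===== PORT B =====
def isSparse_py_alt (x : Int) : Bool :=
  PySem.Int.band x (x >>> (1:Nat)) == 0

-- ===== PRECONDITION & SPEC =====
def Spec_isSparse_py (x : Int) (out : Bool) : Prop := out = isSparse_py_alt x
instance (x : Int) (out : Bool) : Decidable (Spec_isSparse_py x out) := by unfold Spec_isSparse_py; infer_instance

-- ===== CLAIM (what is proved, stated in full; the proofs are below) =====
def Claim_equal_isSparse_py : Prop := ∀ (x : Int), Dom_isSparse_py x → Spec_isSparse_py x (isSparse_py x)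

-- ===== LEMMAS AND PROOFS =====
theorem natland_half (n m : Nat) : n &&& m = 2 * (n/2 &&& m/2) + n%2 * (m%2) := by
  apply Nat.eq_of_testBit_eq
  intro i
  cases i with
  | zero =>
    rw [Nat.testBit_land, Nat.testBit_zero, Nat.testBit_zero, Nat.testBit_zero]
    rcases Nat.mod_two_eq_zero_or_one n with h1 | h1 <;>
      rcases Nat.mod_two_eq_zero_or_one m with h2 | h2 <;>
      simp [h1, h2]
  | succ i =>
    have h : (2 * (n / 2 &&& m / 2) + n % 2 * (m % 2)) / 2 = (n/2 &&& m/2) := by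
      rcases Nat.mod_two_eq_zero_or_one n with h1 | h1 <;>
        rcases Nat.mod_two_eq_zero_or_one m with h2 | h2 <;> simp [h1, h2] <;> omega
    rw [Nat.testBit_succ, Nat.testBit_succ, h, Nat.and_div_two]
theorem natlor_half (n m : Nat) : n ||| m = 2 * (n/2 ||| m/2) + (n%2 + m%2 - n%2 * (m%2)) := by
  apply Nat.eq_of_testBit_eq
  intro i
  cases i with
  | zero =>
    rw [Nat.testBit_lor, Nat.testBit_zero, Nat.testBit_zero, Nat.testBit_zero]
    rcases Nat.mod_two_eq_zero_or_one n with h1 | h1 <;>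
      rcases Nat.mod_two_eq_zero_or_one m with h2 | h2 <;>
      simp [h1, h2]
  | succ i =>
    have h : (2 * (n / 2 ||| m / 2) + (n%2 + m%2 - n%2 * (m%2))) / 2 = (n/2 ||| m/2) := by
      rcases Nat.mod_two_eq_zero_or_one n with h1 | h1 <;>
        rcases Nat.mod_two_eq_zero_or_one m with h2 | h2 <;> simp [h1, h2] <;> omega
    rw [Nat.testBit_succ, Nat.testBit_succ, h, Nat.or_div_two]

theorem band_half (a b : Int) :
    PySem.Int.band a b = 2 * PySem.Int.band (a >>> (1:Nat)) (b >>> (1:Nat)) + (a % 2) * (b % 2) := by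
  have hs : ∀ x : Int, x >>> (1:Nat) = x / 2 := by
    intro x; rw [Int.shiftRight_eq_div_pow]; norm_num
  rw [hs, hs]
  unfold PySem.Int.band
  rcases (by omega : 0 ≤ a ∨ a < 0) with ha | ha <;> rcases (by omega : 0 ≤ b ∨ b < 0) with hb | hb
  · -- both nonneg
    rw [if_pos ha, if_pos hb, if_pos (by omega : (0:Int) ≤ a / 2), if_pos (by omega : (0:Int) ≤ b / 2)]
    have h1 : (a/2).toNat = a.toNat/2 := by omega
    have h2 : (b/2).toNat = b.toNat/2 := by omega
    have h3 : a % 2 = ((a.toNat % 2 : Nat) : Int) := by omega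
    have h4 : b % 2 = ((b.toNat % 2 : Nat) : Int) := by omega
    rw [h1, h2, h3, h4, natland_half a.toNat b.toNat]
    push_cast
    ring
  · -- a ≥ 0, b < 0
    rw [if_pos ha, if_neg (by omega : ¬ (0:Int) ≤ b), if_pos (by omega : (0:Int) ≤ a / 2),
        if_neg (by omega : ¬ (0:Int) ≤ b / 2)]
    have h1 : (a/2).toNat = a.toNat/2 := by omega
    have h2 : (-(b/2) - 1).toNat = (-b-1).toNat/2 := by omega
    have h3 : a % 2 = ((a.toNat % 2 : Nat) : Int) := by omega
    have h4 : b % 2 = 1 - (((-b-1).toNat % 2 : Nat) : Int) := by omega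
    rw [h1, h2, h3, h4]
    have hl := natland_half a.toNat (-b-1).toNat
    have hle1 : a.toNat &&& (-b-1).toNat ≤ a.toNat := Nat.and_le_left
    have hle2 : a.toNat/2 &&& (-b-1).toNat/2 ≤ a.toNat/2 := Nat.and_le_left
    rcases Nat.mod_two_eq_zero_or_one a.toNat with p1 | p1 <;>
      rcases Nat.mod_two_eq_zero_or_one (-b-1).toNat with p2 | p2 <;>
      rw [p1, p2] at hl ⊢ <;> omega
  · -- a < 0, b ≥ 0
    rw [if_neg (by omega : ¬ (0:Int) ≤ a), if_pos hb, if_neg (by omega : ¬ (0:Int) ≤ a / 2),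
        if_pos (by omega : (0:Int) ≤ b / 2)]
    have h1 : (b/2).toNat = b.toNat/2 := by omega
    have h2 : (-(a/2) - 1).toNat = (-a-1).toNat/2 := by omega
    have h3 : b % 2 = ((b.toNat % 2 : Nat) : Int) := by omega
    have h4 : a % 2 = 1 - (((-a-1).toNat % 2 : Nat) : Int) := by omega
    rw [h1, h2, h3, h4]
    have hl := natland_half b.toNat (-a-1).toNat
    have hle1 : b.toNat &&& (-a-1).toNat ≤ b.toNat := Nat.and_le_left
    have hle2 : b.toNat/2 &&& (-a-1).toNat/2 ≤ b.toNat/2 := Nat.and_le_left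
    rcases Nat.mod_two_eq_zero_or_one b.toNat with p1 | p1 <;>
      rcases Nat.mod_two_eq_zero_or_one (-a-1).toNat with p2 | p2 <;>
      rw [p1, p2] at hl ⊢ <;> omega
  · -- both neg
    rw [if_neg (by omega : ¬ (0:Int) ≤ a), if_neg (by omega : ¬ (0:Int) ≤ b),
        if_neg (by omega : ¬ (0:Int) ≤ a / 2), if_neg (by omega : ¬ (0:Int) ≤ b / 2)]
    have h1 : (-(a/2) - 1).toNat = (-a-1).toNat/2 := by omega
    have h2 : (-(b/2) - 1).toNat = (-b-1).toNat/2 := by omega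
    have h3 : a % 2 = 1 - (((-a-1).toNat % 2 : Nat) : Int) := by omega
    have h4 : b % 2 = 1 - (((-b-1).toNat % 2 : Nat) : Int) := by omega
    rw [h1, h2, h3, h4]
    have hl := natlor_half (-a-1).toNat (-b-1).toNat
    rcases Nat.mod_two_eq_zero_or_one (-a-1).toNat with p1 | p1 <;>
      rcases Nat.mod_two_eq_zero_or_one (-b-1).toNat with p2 | p2 <;>
      rw [p1, p2] at hl ⊢ <;> omega

theorem shift1 (x : Int) : x >>> (1:Nat) = x / 2 := by
  rw [Int.shiftRight_eq_div_pow]; norm_num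

theorem int_not_eq (a : Int) : Int.not a = -a - 1 := by
  cases a <;> simp [Int.not] <;> omega

theorem band_mod2 (a b : Int) : PySem.Int.band a b % 2 = (a % 2) * (b % 2) := by
  rw [band_half a b]
  rcases (by omega : a % 2 = 0 ∨ a % 2 = 1) with h1 | h1 <;>
    rcases (by omega : b % 2 = 0 ∨ b % 2 = 1) with h2 | h2 <;>
    rw [h1, h2] <;> ring_nf <;> omega

theorem band_not_self_aux (a : Int) : PySem.Int.band a (-a - 1) = 0 := by
  unfold PySem.Int.band
  rcases (by omega : 0 ≤ a ∨ a < 0) with ha | ha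
  · rw [if_pos ha, if_neg (by omega : ¬ (0:Int) ≤ -a - 1)]
    have : (-(-a-1) - 1).toNat = a.toNat := by omega
    rw [this, Nat.and_self]
    omega
  · rw [if_neg (by omega : ¬ (0:Int) ≤ a), if_pos (by omega : (0:Int) ≤ -a - 1)]
    rw [Nat.and_self]
    omega

theorem band_lowbit : ∀ (v : Nat) (m : Int), m % 2 = 1 →
    PySem.Int.band (2^v * m) (-(2^v * m)) = 2^v := by
  intro v
  induction v with
  | zero =>
    intro m hm
    rw [band_half]
    have h1 : (2^0 * m) >>> (1:Nat) = m / 2 := by rw [shift1]; ring_nf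
    have h2 : (-(2^0 * m)) >>> (1:Nat) = -(m/2) - 1 := by rw [shift1]; omega
    rw [h1, h2, band_not_self_aux]
    have : (-(2^0 * m)) % 2 = 1 := by omega
    rw [this]
    have : (2^0 * m) % 2 = 1 := by omega
    rw [this]
    norm_num
  | succ v ih =>
    intro m hm
    have hP : (2:Int)^(v+1) * m = 2 * (2^v * m) := by ring
    rw [band_half, hP, neg_mul_eq_mul_neg]
    have h1 : (2 * (2^v * m)) >>> (1:Nat) = 2^v * m := by rw [shift1]; omega
    have h2 : (2 * -(2^v * m)) >>> (1:Nat) = -(2^v * m) := by rw [shift1]; omega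
    have h3 : (2 * (2^v * m)) % 2 = 0 := by omega
    have h4 : (2 * -(2^v * m)) % 2 = 0 := by omega
    rw [h1, h2, h3, h4, ih m hm]
    ring

theorem band_clear : ∀ (v : Nat) (m : Int), m % 2 = 1 →
    PySem.Int.band (2^v * m) (Int.not (2^v)) = 2^v * m - 2^v := by
  intro v
  induction v with
  | zero =>
    intro m hm
    rw [int_not_eq, band_half]
    have h1 : (2^0 * m) >>> (1:Nat) = m / 2 := by rw [shift1]; ring_nf
    have h2 : (-(2:Int)^0 - 1) >>> (1:Nat) = -1 := by rw [shift1]; norm_num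
    have h3 : (-(2:Int)^0 - 1) % 2 = 0 := by norm_num
    rw [h1, h2, h3, PySem.Int.band_neg_one]
    ring_nf
    omega
  | succ v ih =>
    intro m hm
    have hP : (2:Int)^(v+1) * m = 2 * (2^v * m) := by ring
    rw [int_not_eq, band_half, hP]
    have h1 : (2 * (2^v * m)) >>> (1:Nat) = 2^v * m := by rw [shift1]; omega
    have hQ : (2:Int)^(v+1) = 2 * 2^v := by ring
    have h2 : (-(2:Int)^(v+1) - 1) >>> (1:Nat) = -(2:Int)^v - 1 := by rw [shift1, hQ]; omega
    have h3 : (2 * (2^v * m)) % 2 = 0 := by omega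
    rw [h1, h2, h3]
    have := ih m hm
    rw [int_not_eq] at this
    rw [this]
    ring

theorem natpow_and_natpow (u w : Nat) (h : u ≠ w) : 2^u &&& 2^w = 0 := by
  apply Nat.eq_of_testBit_eq
  intro i
  rw [Nat.testBit_land, Nat.testBit_two_pow, Nat.testBit_two_pow]
  simp only [Nat.zero_testBit]
  by_cases h1 : u = i <;> by_cases h2 : w = i <;> simp [h1, h2] <;> omega

theorem band_pow_shift (u : Nat) : PySem.Int.band (2^u) ((2^u : Int) >>> (1:Nat)) = 0 := by
  cases u with
  | zero => decide
  | succ u =>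
    have h1 : ((2:Int)^(u+1)) >>> (1:Nat) = 2^u := by
      rw [shift1]; have : (2:Int)^(u+1) = 2 * 2^u := by ring
      omega
    rw [h1]
    have h2 : ((2:Int)^(u+1)) = ((2^(u+1) : Nat) : Int) := by push_cast; ring
    have h3 : ((2:Int)^u) = ((2^u : Nat) : Int) := by push_cast; ring
    rw [h2, h3, PySem.Int.band_natCast, natpow_and_natpow (u+1) u (by omega)]
    norm_num

theorem band_add_low : ∀ (u : Nat) (c : Int),
    PySem.Int.band (2^(u+2)*c + 2^u) ((2^(u+2)*c + 2^u) >>> (1:Nat))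
      = PySem.Int.band (2^(u+2)*c) ((2^(u+2)*c) >>> (1:Nat)) := by
  intro u
  induction u with
  | zero =>
    intro c
    have e0 : (2:Int)^(0+2)*c + 2^0 = 2*(2*c) + 1 := by ring
    have e1 : (2:Int)^(0+2)*c = 2*(2*c) := by ring
    rw [e0, e1, band_half, band_half (2*(2*c))]
    have h1 : (2*(2*c) + 1) >>> (1:Nat) = 2*c := by rw [shift1]; omega
    have h2 : (2*(2*c)) >>> (1:Nat) = 2*c := by rw [shift1]; omega
    have h3 : (2*c) >>> (1:Nat) = c := by rw [shift1]; omega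
    rw [h1, h2, h3]
    have p1 : (2*(2*c) + 1) % 2 = 1 := by omega
    have p2 : (2*c) % 2 = 0 := by omega
    have p3 : (2*(2*c)) % 2 = 0 := by omega
    rw [p1, p2, p3]
    ring
  | succ u ih =>
    intro c
    have e0 : (2:Int)^(u+1+2)*c + 2^(u+1) = 2*(2^(u+2)*c + 2^u) := by ring
    have e1 : (2:Int)^(u+1+2)*c = 2*(2^(u+2)*c) := by ring
    rw [e0, e1, band_half, band_half (2*(2^(u+2)*c))]
    have h1 : (2*(2^(u+2)*c + 2^u)) >>> (1:Nat) = 2^(u+2)*c + 2^u := by rw [shift1]; omega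
    have h2 : (2*(2^(u+2)*c)) >>> (1:Nat) = 2^(u+2)*c := by rw [shift1]; omega
    rw [h1, h2]
    have p1 : (2*(2^(u+2)*c + 2^u)) % 2 = 0 := by omega
    have p2 : (2*(2^(u+2)*c)) % 2 = 0 := by omega
    rw [p1, p2, ih c]
    ring

theorem band_adjacent : ∀ (u : Nat) (m : Int), m % 2 = 1 →
    PySem.Int.band (2^(u+1)*m + 2^u) ((2^(u+1)*m + 2^u) >>> (1:Nat)) ≠ 0 := by
  intro u
  induction u with
  | zero =>
    intro m hm
    have e0 : (2:Int)^(0+1)*m + 2^0 = 2*m + 1 := by ring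
    rw [e0]
    have h1 : (2*m + 1) >>> (1:Nat) = m := by rw [shift1]; omega
    rw [h1]
    intro hzero
    have hh := band_mod2 (2*m+1) m
    have p : (2*m+1) % 2 = 1 := by omega
    rw [hzero, p, one_mul, hm] at hh
    omega
  | succ u ih =>
    intro m hm
    have e0 : (2:Int)^(u+1+1)*m + 2^(u+1) = 2*(2^(u+1)*m + 2^u) := by ring
    rw [e0, band_half]
    have h1 : (2*(2^(u+1)*m + 2^u)) >>> (1:Nat) = 2^(u+1)*m + 2^u := by rw [shift1]; omega
    rw [h1]
    have p1 : (2*(2^(u+1)*m + 2^u)) % 2 = 0 := by omega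
    rw [p1, zero_mul, add_zero]
    have := ih m hm
    omega

theorem nb_shift : ∀ (v n : Nat), PySem.Int.bitCount ((2^v * n : Nat) : Int) = PySem.Int.bitCount (n : Int) := by
  intro v
  induction v with
  | zero => intro n; norm_num
  | succ v ih =>
    intro n
    rcases Nat.eq_zero_or_pos n with h | h
    · simp [h]
    · have hpos : 0 < 2^(v+1) * n := by positivity
      rw [PySem.Int.bitCount_natCast hpos]
      have h1 : (2^(v+1) * n) % 2 = 0 := by
        have : 2^(v+1) * n = 2 * (2^v * n) := by ring
        omega
      have h2 : (2^(v+1) * n) / 2 = 2^v * n := by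
        have : 2^(v+1) * n = 2 * (2^v * n) := by ring
        omega
      rw [h1, h2, ih n]
      omega

theorem nb_succ : ∀ (k : Nat), PySem.Int.bitCount ((k+1 : Nat) : Int) ≤ PySem.Int.bitCount (k : Nat) + 1 := by
  intro k
  induction k using Nat.strong_induction_on with
  | _ k ih =>
    rcases Nat.eq_zero_or_pos k with h | h
    · subst h
      norm_num
      have : ((1:Nat) : Int) = (1 : Int) := by norm_num
      rw [← this, PySem.Int.bitCount_natCast (by omega : 0 < 1)]
      simp
    · rw [PySem.Int.bitCount_natCast (by omega : 0 < k + 1), PySem.Int.bitCount_natCast h]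
      rcases Nat.mod_two_eq_zero_or_one k with h2 | h2
      · have e1 : (k+1) % 2 = 1 := by omega
        have e2 : (k+1) / 2 = k / 2 := by omega
        rw [e1, e2]
        omega
      · have e1 : (k+1) % 2 = 0 := by omega
        have e2 : (k+1) / 2 = k/2 + 1 := by omega
        rw [e1, e2]
        have := ih (k/2) (by omega)
        omega

theorem nb_dec (n : Nat) (h : n % 2 = 1) :
    PySem.Int.bitCount ((n - 1 : Nat) : Int) + 1 = PySem.Int.bitCount (n : Int) := by
  rw [PySem.Int.bitCount_natCast (by omega : 0 < n), h]
  rcases Nat.eq_zero_or_pos (n-1) with h1 | h1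
  · have : n = 1 := by omega
    subst this
    norm_num
  · rw [PySem.Int.bitCount_natCast h1]
    have e1 : (n-1) % 2 = 0 := by omega
    have e2 : (n-1) / 2 = n / 2 := by omega
    rw [e1, e2]
    omega

theorem nb_three (n : Nat) (h : n % 4 = 3) :
    PySem.Int.bitCount ((n + 1 : Nat) : Int) + 1 ≤ PySem.Int.bitCount (n : Int) := by
  have hn : 0 < n := by omega
  rw [PySem.Int.bitCount_natCast hn, (by omega : n % 2 = 1)]
  rw [PySem.Int.bitCount_natCast (by omega : 0 < n / 2), (by omega : n / 2 % 2 = 1)]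
  -- n = 4k+3 : bc n = 2 + bc k,  n+1 = 4(k+1)
  have e4 : n + 1 = 2^2 * (n/4 + 1) := by omega
  rw [e4, nb_shift 2 (n/4 + 1)]
  have e5 : n / 2 / 2 = n / 4 := by omega
  rw [e5]
  have := nb_succ (n/4)
  omega

theorem pow2_inj {a b : Nat} (h : (2:Int)^a = 2^b) : a = b := by
  have : ((2^a : Nat) : Int) = ((2^b : Nat) : Int) := by push_cast; exact h
  have h2 : (2^a : Nat) = 2^b := by exact_mod_cast this
  exact Nat.pow_right_injective (by omega) h2

theorem odd_decomp : ∀ (n : Nat) (x : Int), x.natAbs ≤ n → x ≠ 0 →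
    ∃ (v : Nat) (m : Int), x = 2^v * m ∧ m % 2 = 1 := by
  intro n
  induction n with
  | zero => intro x h hx; exfalso; omega
  | succ n ih =>
    intro x h hx
    rcases (by omega : x % 2 = 1 ∨ x % 2 = 0) with hp | hp
    · exact ⟨0, x, by ring, hp⟩
    · have hx2 : x / 2 ≠ 0 := by omega
      have hle : (x/2).natAbs ≤ n := by omega
      obtain ⟨v, m, hvm, hm⟩ := ih (x/2) hle hx2
      refine ⟨v+1, m, ?_, hm⟩
      have hxx : x = 2 * (x/2) := by omega
      rw [hxx, hvm]
      ring

theorem loop_step (f : Nat)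
    (ih : ∀ (x low : Int),
      (low = 0 ∨ ∃ u : Nat, low = 2^u ∧ (2^(u+1) : Int) ∣ x) →
      2 * PySem.Int.bitCount x + 2 ≤ f →
      isSparseLoop f x low
        = decide (PySem.Int.band (x + low) ((x + low) >>> (1:Nat)) = 0))
    (v : Nat) (m x : Int) (hvm : x = 2^v * m) (hm : m % 2 = 1)
    (hf : 2 * PySem.Int.bitCount x + 2 ≤ f + 1) :
    isSparseLoop f (x - 2^v) (2^v)
      = decide (PySem.Int.band x (x >>> (1:Nat)) = 0) := by
  have hP : (0:Int) < 2^v := by positivity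
  have hx' : x - 2^v = 2^v * (m - 1) := by rw [hvm]; ring
  have hx'' : x - 2^v = 2^(v+1) * ((m-1)/2) := by
    have h2 : x - 2^v = 2^v * (2 * ((m-1)/2)) := by
      rw [hx']; congr 1; omega
    rw [h2]; ring
  rcases (by omega : 0 < m ∨ (m < 0 ∧ m % 4 = 1) ∨ (m < 0 ∧ m % 4 = 3)) with hmp | ⟨hmn, hm4⟩ | ⟨hmn, hm4⟩
  · -- m > 0 : bitCount drops by one
    obtain ⟨M, hM⟩ : ∃ M : Nat, m = (M : Int) := ⟨m.toNat, by omega⟩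
    have hM1 : 1 ≤ M := by omega
    have hMo : M % 2 = 1 := by omega
    have hbc : PySem.Int.bitCount (x - 2^v) + 1 = PySem.Int.bitCount x := by
      have e1 : x = ((2^v * M : Nat) : Int) := by rw [hvm, hM]; push_cast; ring
      have e2 : x - 2^v = ((2^v * (M - 1) : Nat) : Int) := by
        rw [hx', hM]; push_cast [Nat.cast_sub hM1]; ring
      rw [e2, e1, nb_shift, nb_shift]
      exact nb_dec M hMo
    rw [ih (x - 2^v) (2^v) (Or.inr ⟨v, rfl, ⟨(m-1)/2, hx''⟩⟩) (by omega)]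
    rw [sub_add_cancel]
  · -- m < 0, m % 4 = 1 : bitCount still drops
    obtain ⟨M, hM⟩ : ∃ M : Nat, m = -(M : Int) := ⟨(-m).toNat, by omega⟩
    have hM4 : M % 4 = 3 := by omega
    have hbc : PySem.Int.bitCount (x - 2^v) + 1 ≤ PySem.Int.bitCount x := by
      have e1 : x = -((2^v * M : Nat) : Int) := by rw [hvm, hM]; push_cast; ring
      have e2 : x - 2^v = -((2^v * (M + 1) : Nat) : Int) := by
        rw [hx', hM]; push_cast; ring
      rw [e2, e1, PySem.Int.bitCount_neg, PySem.Int.bitCount_neg, nb_shift, nb_shift]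
      exact nb_three M hM4
    rw [ih (x - 2^v) (2^v) (Or.inr ⟨v, rfl, ⟨(m-1)/2, hx''⟩⟩) (by omega)]
    rw [sub_add_cancel]
  · -- m < 0, m % 4 = 3 : next iteration detects the adjacent pair directly
    cases f with
    | zero => exfalso; omega
    | succ f' =>
      have hm' : ((m-1)/2) % 2 = 1 := by omega
      have hneg : x - 2^v < 0 := by
        rw [hx']; exact mul_neg_of_pos_of_neg hP (by omega)
      have hne : x - 2^v ≠ 0 := by omega
      have hbit2 : PySem.Int.band (x - 2^v) (-(x - 2^v)) = 2^(v+1) := by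
        rw [hx'']; exact band_lowbit (v+1) _ hm'
      simp only [isSparseLoop, if_neg hne, hbit2]
      rw [Int.shiftLeft_eq, if_pos (by ring)]
      have hnz : PySem.Int.band x (x >>> (1:Nat)) ≠ 0 := by
        have hh := band_adjacent v ((m-1)/2) hm'
        have hxeq : 2^(v+1)*((m-1)/2) + 2^v = x := by rw [← hx'']; ring
        rw [hxeq] at hh
        exact hh
      simp [hnz]

theorem loop_spec : ∀ (fuel : Nat) (x low : Int),
    (low = 0 ∨ ∃ u : Nat, low = 2^u ∧ (2^(u+1) : Int) ∣ x) →
    2 * PySem.Int.bitCount x + 2 ≤ fuel →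
    isSparseLoop fuel x low
      = decide (PySem.Int.band (x + low) ((x + low) >>> (1:Nat)) = 0) := by
  intro fuel
  induction fuel with
  | zero => intro x low _ hf; exfalso; omega
  | succ f ih =>
    intro x low hI hf
    by_cases hx : x = 0
    · subst hx
      have htrue : ∀ l : Int, isSparseLoop (f+1) 0 l = true := by
        intro l; simp [isSparseLoop]
      rcases hI with h0 | ⟨u, hu, _⟩
      · subst h0; rw [htrue]; decide
      · subst hu
        rw [htrue, zero_add]
        simp [band_pow_shift u]
    · obtain ⟨v, m, hvm, hm⟩ := odd_decomp x.natAbs x (le_refl _) hx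
      have hP : (0:Int) < 2^v := by positivity
      have hbit : PySem.Int.band x (-x) = 2^v := by rw [hvm]; exact band_lowbit v m hm
      have hclear : PySem.Int.band x (Int.not (2^v)) = x - 2^v := by
        rw [hvm]; rw [band_clear v m hm]
      simp only [isSparseLoop, if_neg hx, hbit, hclear]
      rw [Int.shiftLeft_eq]
      rcases hI with h0 | ⟨u, hu, hdvd⟩
      · subst h0
        rw [if_neg (by intro hcontra; rw [zero_mul] at hcontra; exact absurd hcontra (ne_of_gt hP)), add_zero]
        exact loop_step f ih v m x hvm hm hf
      · subst hu
        have hv_ge : u + 1 ≤ v := by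
          by_contra hlt
          obtain ⟨c, hc⟩ := hdvd
          have hsplit : (2:Int)^(u+1) = 2^v * 2^(u+1-v) := by
            rw [← pow_add]; congr 1; omega
          rw [hvm, hsplit] at hc
          have hmc : m = 2^(u+1-v) * c := by
            have h2v : (2:Int)^v ≠ 0 := by positivity
            apply mul_left_cancel₀ h2v
            rw [hc]; ring
          have hdd : (2:Int) ∣ 2^(u+1-v) := dvd_pow_self 2 (by omega : u+1-v ≠ 0)
          obtain ⟨d, hd⟩ := hdd
          rw [hmc, hd] at hm
          have he : 2 * d * c = 2 * (d * c) := by ring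
          rw [he] at hm
          omega
        by_cases hadj : v = u + 1
        · subst hadj
          rw [if_pos (by ring : (2:Int)^(u+1) = 2^u * 2^1)]
          have hnz : PySem.Int.band (x + 2^u) ((x + 2^u) >>> (1:Nat)) ≠ 0 := by
            have hh := band_adjacent u m hm
            rw [← hvm] at hh
            exact hh
          simp [hnz]
        · have hvge2 : u + 2 ≤ v := by omega
          rw [if_neg (by
            rw [(by ring : (2:Int)^u * 2^1 = 2^(u+1))]
            intro hcontra
            exact hadj (pow2_inj hcontra))]
          have habs : PySem.Int.band (x + 2^u) ((x + 2^u) >>> (1:Nat))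
              = PySem.Int.band x (x >>> (1:Nat)) := by
            have hxc : x = 2^(u+2) * (2^(v-(u+2)) * m) := by
              rw [hvm, ← mul_assoc, ← pow_add]
              congr 2
              omega
            conv_lhs => rw [hxc]
            rw [band_add_low u (2^(v-(u+2)) * m)]
            rw [← hxc]
          rw [habs]
          exact loop_step f ih v m x hvm hm hf


theorem ports_agree : ∀ x : Int, isSparse_py x = isSparse_py_alt x := by
  intro x
  unfold isSparse_py isSparse_py_alt
  by_cases hx : x = 0
  · subst hx; decide
  · rw [if_neg (by simp [hx])]
    rw [loop_spec _ x 0 (Or.inl rfl) (le_refl _), add_zero]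
    rfl

-- ===== VERDICT (by name: the statement is the Claim_ definition above) =====
theorem isSparse_py_spec : Claim_equal_isSparse_py := by
  intro x _
  unfold Spec_isSparse_py
  exact ports_agree x
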